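-- pv_equiv track=rewrite | github.com/kh277/BOJ | 백준/Silver/9354. It Is Cold/It Is Cold.py | solve
-- ===== SOURCE A (Python) =====
-- def solve(N, S, C):
--     accSum = 0
--     index = N-1
--     isT = False
--     while index >= 0:
--         if isT == False:
--             if C[index] == 'T':
--                 isT = True
--                 accSum += S[index]
--         else:
--             if C[index] == 'A':
--                 accSum -= S[index]
--                 if accSum < 0:
--                     accSum = 0
--             else:
--                 accSum += S[index]
--         index -= 1
--
--     return accSum
-- ===== SOURCE B (Python) =====
-- def solve(N, S, C):
--     # Different algorithm: a single FORWARD pass over signed prefix sums.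
--     # The backward clamped accumulation A performs equals, for the last 'T'
--     # index j, max(P(j), max over 'A'-indices i<=j of P(i-1)), where P is the
--     # signed prefix sum (+S[i] for non-'A', -S[i] for 'A') -- the standard
--     # max-plus expansion of the recurrence acc <- max(acc + x, floor).
--     if N <= 0:
--         return 0
--     run = 0           # P(i), signed prefix sum so far
--     floor_best = None # max over 'A'-indices i so far of P(i-1)
--     ans = 0
--     for s, c in zip(S[:N], C[:N]):
--         if c == 'A':
--             floor_best = run if floor_best is None else max(floor_best, run)
--             run -= s
--         else:
--             run += s
--         if c == 'T':
--             ans = run if floor_best is None else max(run, floor_best)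
--     return ans
-- ===== Notes on version B (the rewrite author's own statement) =====
-- stated objective: alternative
-- what changed: Replaces A's backward boolean-flag state machine (clamped accumulation from the last 'T' down) by a single forward pass over signed prefix sums that evaluates the max-plus closed form of the clamped recurrence: at each 'T' the answer is max(current prefix sum, best clamp floor recorded at the 'A' positions so far).
import Mathlib
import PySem

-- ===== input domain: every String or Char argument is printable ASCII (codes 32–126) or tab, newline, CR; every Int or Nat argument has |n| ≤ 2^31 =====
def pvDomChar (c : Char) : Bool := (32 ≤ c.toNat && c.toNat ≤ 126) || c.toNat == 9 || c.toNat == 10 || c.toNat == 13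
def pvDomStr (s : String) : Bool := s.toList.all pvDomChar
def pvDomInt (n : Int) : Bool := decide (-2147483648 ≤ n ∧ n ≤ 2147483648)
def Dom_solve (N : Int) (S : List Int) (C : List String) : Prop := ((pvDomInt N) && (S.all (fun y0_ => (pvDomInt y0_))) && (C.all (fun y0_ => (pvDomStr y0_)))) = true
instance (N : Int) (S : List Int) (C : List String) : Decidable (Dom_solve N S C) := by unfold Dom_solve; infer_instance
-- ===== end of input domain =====

-- B replaces A's backward boolean-flag state machine by a single FORWARD pass over signed
-- prefix sums (a max-plus closed form of the clamped recurrence); objective: alternative.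


-- ===== PORT A =====
-- A's while loop over index = N-1 … 0 with the isT flag and accSum, as a recursion on index+1
-- (in-range access C[index]/S[index] ported as getD; Pre_solve keeps all accesses in range).
def solveLoopA (S : List Int) (C : List String) : Nat → Bool → Int → Int
  | 0, _, accSum => accSum
  | (i+1), isT, accSum =>
      if isT = false then
        if C.getD i "" == "T" then solveLoopA S C i true (accSum + S.getD i 0)
        else solveLoopA S C i false accSum
      else
        if C.getD i "" == "A" then
          solveLoopA S C i true (if accSum - S.getD i 0 < 0 then 0 else accSum - S.getD i 0)
        else solveLoopA S C i true (accSum + S.getD i 0)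

def solve (N : Int) (S : List Int) (C : List String) : Int :=
  solveLoopA S C N.toNat false 0

-- ===== PORT B =====
-- B's loop body: state (run, floor_best, ans); run is the signed prefix sum, floor_best the
-- best clamp floor seen at an 'A', ans the value recorded at the latest 'T'.
def stepB (st : Int × Option Int × Int) (p : Int × String) : Int × Option Int × Int :=
  if p.2 == "A" then
    (st.1 - p.1,
     some (match st.2.1 with | none => st.1 | some b => max b st.1),
     st.2.2)
  else
    (st.1 + p.1,
     st.2.1,
     if p.2 == "T" then (match st.2.1 with | none => st.1 + p.1 | some b => max (st.1 + p.1) b)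
     else st.2.2)

-- one forward fold over zip(S[:N], C[:N]) (empty problem set: 0)
def solve_alt (N : Int) (S : List Int) (C : List String) : Int :=
  if N ≤ 0 then 0
  else
    ((List.zip (PySem.List.slice S none (some N)) (PySem.List.slice C none (some N))).foldl
        stepB (0, none, 0)).2.2

-- ===== PRECONDITION & SPEC =====
-- Exactly the inputs on which Python A returns without an IndexError: A reads C[i] for every
-- i < N, and S[i] for every i up to the rightmost 'T', so every 'T' among the first N entries
-- of C must lie within S.
def Pre_solve (N : Int) (S : List Int) (C : List String) : Prop :=
  N ≤ (C.length : Int) ∧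
  ∀ i : Nat, i < N.toNat → C.getD i "" = "T" → i < S.length
instance (N : Int) (S : List Int) (C : List String) : Decidable (Pre_solve N S C) := by
  unfold Pre_solve; infer_instance
def pvWitness_solve : Int × List Int × List String := (3, [1, 2, 3], ["A", "T", "B"])
def Spec_solve (N : Int) (S : List Int) (C : List String) (out : Int) : Prop := out = solve_alt N S C
instance (N : Int) (S : List Int) (C : List String) (out : Int) : Decidable (Spec_solve N S C out) := by unfold Spec_solve; infer_instance

-- ===== CLAIM (what is proved, stated in full; the proofs are below) =====
def Claim_equal_solve : Prop := ∀ (N : Int) (S : List Int) (C : List String), Dom_solve N S C → Pre_solve N S C → Spec_solve N S C (solve N S C)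

-- ===== LEMMAS AND PROOFS =====

-- max with an optional floor
def optMax (r : Int) : Option Int → Int
  | none => r
  | some b => max r b

-- B's fold state after the first k indices, itemised through getD (indices below the zip
-- truncation agree with the zipped fold; proved in foldZ_eq_gB)
def gB (S : List Int) (C : List String) : Nat → Int × Option Int × Int
  | 0 => (0, none, 0)
  | k+1 => stepB (gB S C k) (S.getD k 0, C.getD k "")

-- once A's flag is set, its clamped backward loop is the max-plus closed form read off gB
lemma coreA (S : List Int) (C : List String) :
    ∀ (k : Nat) (acc : Int),
      solveLoopA S C k true acc = optMax ((gB S C k).1 + acc) ((gB S C k).2.1) := by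
  intro k
  induction k with
  | zero => intro acc; simp [solveLoopA, gB, optMax]
  | succ k ih =>
      intro acc
      simp only [solveLoopA, gB, ih]
      generalize gB S C k = g
      obtain ⟨r, fb, ans⟩ := g
      generalize S.getD k 0 = s
      generalize C.getD k "" = c
      by_cases hA : c = "A"
      · subst hA
        rcases fb with _ | b <;>
          simp [stepB, optMax, Int.max_def] <;> split_ifs <;> omega
      · rcases fb with _ | b <;>
          simp [stepB, optMax, hA, Int.max_def] <;> (try split_ifs) <;> omega

-- A's flag-false search phase: skipping non-'T' entries, landing in the closed form at the
-- rightmost 'T'; indices at or beyond S.length carry no 'T' (hypothesis), so the fold may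
-- truncate at min k S.length
lemma mainA (S : List Int) (C : List String) :
    ∀ (k : Nat), (∀ i : Nat, i < k → C.getD i "" = "T" → i < S.length) →
      solveLoopA S C k false 0 = (gB S C (min k S.length)).2.2 := by
  intro k
  induction k with
  | zero => intro _; simp [solveLoopA, gB]
  | succ k ih =>
      intro h
      have h' : ∀ i : Nat, i < k → C.getD i "" = "T" → i < S.length :=
        fun i hi => h i (Nat.lt_succ_of_lt hi)
      by_cases hT : C.getD k "" = "T"
      · have hk : k < S.length := h k (Nat.lt_succ_self k) hT
        have hmin : min (k+1) S.length = k + 1 := by omega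
        rw [hmin]
        simp only [solveLoopA, gB, hT, coreA]
        generalize gB S C k = g
        obtain ⟨r, fb, ans⟩ := g
        generalize S.getD k 0 = s
        rcases fb with _ | b <;>
          simp [stepB, optMax, Int.max_def]
      · have hstep : solveLoopA S C (k+1) false 0 = solveLoopA S C k false 0 := by
          have hT' : C[k]?.getD "" ≠ "T" := by
            rwa [List.getD_eq_getElem?_getD] at hT
          simp [solveLoopA, hT']
        have hg : (gB S C (k+1)).2.2 = (gB S C k).2.2 := by
          simp only [gB]
          generalize gB S C k = g
          obtain ⟨r, fb, ans⟩ := g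
          generalize S.getD k 0 = s
          generalize hc : C.getD k "" = c
          rw [hc] at hT
          by_cases hA : c = "A" <;> simp [stepB, hA, hT]
        rw [hstep, ih h']
        rcases Nat.lt_or_ge k S.length with hk | hk
        · have h1 : min (k+1) S.length = k + 1 := by omega
          have h2 : min k S.length = k := by omega
          rw [h1, h2, hg]
        · have h1 : min (k+1) S.length = S.length := by omega
          have h2 : min k S.length = S.length := by omega
          rw [h1, h2]

-- the zipped fold of B equals the itemised state gB up to the zip length
lemma foldZ_eq_gB (S : List Int) (C : List String) (n : Nat) :
    ∀ (k : Nat), k ≤ (List.zip (S.take n) (C.take n)).length →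
      ((List.zip (S.take n) (C.take n)).take k).foldl stepB (0, none, 0) = gB S C k := by
  intro k
  induction k with
  | zero => intro _; simp [gB]
  | succ k ih =>
      intro h
      have hk : k < (List.zip (S.take n) (C.take n)).length := Nat.lt_of_succ_le h
      have hS : k < S.length := by
        simp [List.length_zip, List.length_take] at hk; omega
      have hC : k < C.length := by
        simp [List.length_zip, List.length_take] at hk; omega
      have hkn : k < n := by
        simp [List.length_zip, List.length_take] at hk; omega
      rw [List.take_add_one, List.getElem?_eq_getElem hk, List.foldl_append,
        ih (Nat.le_of_lt hk)]
      have hz : (List.zip (S.take n) (C.take n))[k] = (S.getD k 0, C.getD k "") := by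
        simp [List.getElem_zip, List.getElem_take, List.getD_eq_getElem?_getD, hS, hC]
      simp [gB, hz]

-- ===== VERDICT (by name: the statement is the Claim_ definition above) =====
theorem solve_spec : Claim_equal_solve := by
  intro N S C _ hpre
  obtain ⟨hNC, hT⟩ := hpre
  unfold Spec_solve solve solve_alt
  by_cases hN0 : N ≤ 0
  · have : N.toNat = 0 := by omega
    rw [this, if_pos hN0]
    rfl
  · rw [if_neg hN0]
    have hNcast : N = ((N.toNat : Nat) : Int) := (Int.toNat_of_nonneg (by omega)).symm
    rw [hNcast, PySem.List.slice_to_natCast, PySem.List.slice_to_natCast]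
    have hlen : (List.zip (S.take N.toNat) (C.take N.toNat)).length = min N.toNat S.length := by
      simp [List.length_zip, List.length_take]; omega
    have hfold := foldZ_eq_gB S C N.toNat (List.zip (S.take N.toNat) (C.take N.toNat)).length
      (le_refl _)
    rw [List.take_length] at hfold
    rw [hfold, hlen]
    exact mainA S C N.toNat hT
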